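-- pv_equiv track=rewrite | github.com/OneofGods/Loly | la_liga_legendary_algorithm.py | _get_stronger_la_liga_team
-- ===== SOURCE A (Python) =====
-- def _get_stronger_la_liga_team(home_team: str, away_team: str) -> str:
--     """Determine stronger team based on La Liga hierarchy"""
--     title_contenders = ['REAL MADRID', 'BARCELONA']
--     big_teams = ['ATLETICO MADRID', 'SEVILLA', 'ATHLETIC BILBAO', 'REAL SOCIEDAD']
--
--     home_title = any(team in home_team.upper() for team in title_contenders)
--     away_title = any(team in away_team.upper() for team in title_contenders)
--     home_big = any(team in home_team.upper() for team in big_teams)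
--     away_big = any(team in away_team.upper() for team in big_teams)
--
--     if home_title and not away_title:
--         return home_team
--     elif away_title and not home_title:
--         return away_team
--     elif home_big and not away_big:
--         return home_team
--     elif away_big and not home_big:
--         return away_team
--     else:
--         # Similar level - prefer home
--         return home_team
-- ===== SOURCE B (Python) =====
-- def _get_stronger_la_liga_team(home_team: str, away_team: str) -> str:
--     """Determine stronger team based on La Liga hierarchy"""
--     title_contenders = ['REAL MADRID', 'BARCELONA']
--     big_teams = ['ATLETICO MADRID', 'SEVILLA', 'ATHLETIC BILBAO', 'REAL SOCIEDAD']
--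
--     def strength(name):
--         up = name.upper()
--         score = 0
--         if any(team in up for team in title_contenders):
--             score += 2
--         if any(team in up for team in big_teams):
--             score += 1
--         return score
--
--     return home_team if strength(home_team) >= strength(away_team) else away_team
-- ===== Notes on version B (the rewrite author's own statement) =====
-- stated objective: simpler
-- what changed: Replaces the four cascaded title/big if-elif comparisons with a single numeric strength score (2 per title contender match + 1 per big-team match) and one >= comparison that defaults ties to home.
import Mathlib
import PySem

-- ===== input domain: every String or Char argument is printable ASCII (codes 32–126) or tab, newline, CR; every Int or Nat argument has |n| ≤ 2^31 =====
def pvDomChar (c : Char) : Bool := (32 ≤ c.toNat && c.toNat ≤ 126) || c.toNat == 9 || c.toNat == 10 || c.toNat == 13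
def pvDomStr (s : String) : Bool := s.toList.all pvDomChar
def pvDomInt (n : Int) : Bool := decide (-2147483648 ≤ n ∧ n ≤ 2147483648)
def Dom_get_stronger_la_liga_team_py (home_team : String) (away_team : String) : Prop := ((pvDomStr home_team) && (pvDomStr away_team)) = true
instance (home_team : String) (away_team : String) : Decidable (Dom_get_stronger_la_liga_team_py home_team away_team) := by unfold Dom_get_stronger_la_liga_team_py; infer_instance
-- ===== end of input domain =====

-- B replaces A's four cascaded if/elif branch comparisons with a numeric strength
-- score (2 for a title-contender substring match + 1 for a big-team match) and a
-- single >= comparison; objective: simpler.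
-- ===== PORT A =====
def get_stronger_la_liga_team_py (home_team : String) (away_team : String) : String :=
  let title_contenders := ["REAL MADRID", "BARCELONA"]
  let big_teams := ["ATLETICO MADRID", "SEVILLA", "ATHLETIC BILBAO", "REAL SOCIEDAD"]
  let home_title := title_contenders.any (fun team => PySem.Str.isIn team (PySem.Str.upper home_team))
  let away_title := title_contenders.any (fun team => PySem.Str.isIn team (PySem.Str.upper away_team))
  let home_big := big_teams.any (fun team => PySem.Str.isIn team (PySem.Str.upper home_team))
  let away_big := big_teams.any (fun team => PySem.Str.isIn team (PySem.Str.upper away_team))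
  if home_title && !away_title then home_team
  else if away_title && !home_title then away_team
  else if home_big && !away_big then home_team
  else if away_big && !home_big then away_team
  else home_team

-- ===== PORT B =====
-- helper 'strength' of Source B
def pvStrength (name : String) : Int :=
  let title_contenders := ["REAL MADRID", "BARCELONA"]
  let big_teams := ["ATLETICO MADRID", "SEVILLA", "ATHLETIC BILBAO", "REAL SOCIEDAD"]
  let up := PySem.Str.upper name
  let score : Int := 0
  let score := if title_contenders.any (fun team => PySem.Str.isIn team up) then score + 2 else score
  let score := if big_teams.any (fun team => PySem.Str.isIn team up) then score + 1 else score
  score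

def get_stronger_la_liga_team_py_alt (home_team : String) (away_team : String) : String :=
  if pvStrength home_team >= pvStrength away_team then home_team else away_team

-- ===== PRECONDITION & SPEC =====
def Spec_get_stronger_la_liga_team_py (home_team : String) (away_team : String) (out : String) : Prop := out = get_stronger_la_liga_team_py_alt home_team away_team
instance (home_team : String) (away_team : String) (out : String) : Decidable (Spec_get_stronger_la_liga_team_py home_team away_team out) := by unfold Spec_get_stronger_la_liga_team_py; infer_instance

-- ===== CLAIM (what is proved, stated in full; the proofs are below) =====
def Claim_equal_get_stronger_la_liga_team_py : Prop := ∀ (home_team : String) (away_team : String), Dom_get_stronger_la_liga_team_py home_team away_team → Spec_get_stronger_la_liga_team_py home_team away_team (get_stronger_la_liga_team_py home_team away_team)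

-- ===== LEMMAS AND PROOFS =====
-- the cascade and the score comparison agree as functions of the four flags
theorem pvCascade_eq_score (ht aw hb ab : Bool) (h a : String) :
    (if ht && !aw then h
     else if aw && !ht then a
     else if hb && !ab then h
     else if ab && !hb then a
     else h)
    = (if (if hb then (if ht then (0:Int) + 2 else 0) + 1 else (if ht then (0:Int) + 2 else 0))
          >= (if ab then (if aw then (0:Int) + 2 else 0) + 1 else (if aw then (0:Int) + 2 else 0))
       then h else a) := by
  cases ht <;> cases aw <;> cases hb <;> cases ab <;> norm_num

-- ===== VERDICT (by name: the statement is the Claim_ definition above) =====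
theorem get_stronger_la_liga_team_py_spec : Claim_equal_get_stronger_la_liga_team_py := by
  intro home_team away_team _
  show _ = _
  simp only [get_stronger_la_liga_team_py, get_stronger_la_liga_team_py_alt, pvStrength]
  exact pvCascade_eq_score _ _ _ _ _ _
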